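-- pv_equiv track=rewrite | github.com/thomasly/chemreader | chemreader/readers/readmol2.py | _parse
-- ===== SOURCE A (Python) =====
-- def _parse(block):
--     r""" Parse the block content and dump the records into a dict
--     """
--     contents = block.strip().split("\n")
--     contents_dict = dict()
--     current_key = "<TEMP>"
--     contents_dict[current_key] = list()
--     for line in contents:
--         if line.startswith("@"):
--             try:
--                 # get record type
--                 current_key = line.split("<TRIPOS>")[1]
--                 contents_dict[current_key] = list()
--                 continue
--             except IndexError:  # <TRIPOS> without a name
--                 current_key = "<TEMP>"
--                 continue
--         contents_dict[current_key].append(line.strip())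
--     # discard the contents without record types
--     contents_dict.pop("<TEMP>")
--     return contents_dict
-- ===== SOURCE B (Python) =====
-- def _parse(block):
--     r""" Parse the block content and dump the records into a dict
--     """
--     lines = block.strip().split("\n")
--     # drop the lines before the first section marker (they have no record type)
--     while lines and not lines[0].startswith("@"):
--         lines = lines[1:]
--     result = {}
--     while lines:
--         header, lines = lines[0], lines[1:]
--         body = []
--         while lines and not lines[0].startswith("@"):
--             body.append(lines[0].strip())
--             lines = lines[1:]
--         parts = header.split("<TRIPOS>")
--         if len(parts) > 1:
--             result[parts[1]] = body
--     return result
-- ===== Notes on version B (the rewrite author's own statement) =====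
-- stated objective: alternative
-- what changed: Replaces A's single stateful pass (current-key register, append into a live dict bucket, a <TEMP> bucket created and popped at the end) by section-wise grouping: drop the pre-marker lines, then repeatedly cut off one header plus its body and insert the complete body at its key, never materialising a sentinel bucket.
-- intended difference: On blocks containing a section header whose record type is literally '<TEMP>' (a line starting with '@' whose split('<TRIPOS>')[1] == '<TEMP>'), A silently discards that record because its final pop of the internal '<TEMP>' sentinel bucket also removes it, while B keeps the record under key '<TEMP>' as intended, since a record type spelled '<TEMP>' is a legitimate section name. — e.g. on _parse("@<TRIPOS><TEMP>\nx"): A returns [], B returns [("<TEMP>", ["x"])]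
import Mathlib
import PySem

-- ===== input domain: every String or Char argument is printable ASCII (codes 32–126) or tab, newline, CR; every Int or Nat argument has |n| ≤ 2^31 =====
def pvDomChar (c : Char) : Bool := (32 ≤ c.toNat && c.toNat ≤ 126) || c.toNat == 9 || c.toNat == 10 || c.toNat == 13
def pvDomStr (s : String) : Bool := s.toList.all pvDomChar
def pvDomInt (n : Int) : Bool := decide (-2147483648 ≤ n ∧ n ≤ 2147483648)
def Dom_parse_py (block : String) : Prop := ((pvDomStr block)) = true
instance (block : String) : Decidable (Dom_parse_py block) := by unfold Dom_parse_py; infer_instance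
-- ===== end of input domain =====

-- B replaces A's stateful single pass (current-key register + live <TEMP> bucket popped at the
-- end) by section-wise grouping: drop the pre-marker lines, then cut off one header plus its
-- whole body at a time and insert the finished body at its key (objective: alternative).
-- On blocks with a section literally named '<TEMP>' the two differ (see D_parse_py below).

-- s.split(sep) for a non-empty literal sep (exact: PySem.Str.split? is `some` of this list for sep ≠ "")
def pvSplit (s sep : String) : List String :=
  (PySem.Chars.splitOn s.toList sep.toList).map String.ofList

-- ===== PORT A =====
-- one iteration of A's `for line in contents` loop; state = (contents_dict, current_key).
-- `contents_dict[current_key].append(...)` is `modify` with default []: the key is always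
-- present (it was just inserted, or it is "<TEMP>", inserted at the start), so this is exact.
def pvStepA (st : PySem.Dict String (List String) × String) (line : String) :
    PySem.Dict String (List String) × String :=
  if PySem.Str.startswith line "@" then
    match PySem.List.pyGet? (pvSplit line "<TRIPOS>") 1 with
    | some k => (st.1.insert k [], k)          -- current_key = …[1]; contents_dict[current_key] = list()
    | none => (st.1, "<TEMP>")                 -- IndexError: <TRIPOS> without a name
  else
    (st.1.modify st.2 [] (fun xs => xs ++ [PySem.Str.strip line]), st.2)

def parse_py (block : String) : List (String × List String) :=
  let contents := pvSplit (PySem.Str.strip block) "\n"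
  let st0 : PySem.Dict String (List String) × String :=
    (PySem.Dict.empty.insert "<TEMP>" [], "<TEMP>")
  -- contents_dict.pop("<TEMP>"): "<TEMP>" is always present, so pop = erase
  ((contents.foldl pvStepA st0).1.erase "<TEMP>").items

-- ===== PORT B =====
-- `while lines and not lines[0].startswith("@"): lines = lines[1:]`
def pvDropPre : List String → List String
  | [] => []
  | l :: ls => if PySem.Str.startswith l "@" then l :: ls else pvDropPre ls

-- the inner `while` loop: collect the stripped body up to the next '@' line, return (body, rest)
def pvTakeBody : List String → List String × List String
  | [] => ([], [])
  | l :: ls =>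
    if PySem.Str.startswith l "@" then ([], l :: ls)
    else
      let r := pvTakeBody ls
      (PySem.Str.strip l :: r.1, r.2)

theorem pvTakeBody_snd_le (ls : List String) : (pvTakeBody ls).2.length ≤ ls.length := by
  induction ls with
  | nil => simp [pvTakeBody]
  | cons l ls ih =>
    simp only [pvTakeBody]
    split
    · simp
    · simpa using Nat.le_succ_of_le ih

-- the outer `while lines:` loop, carrying the result dict
def pvSections : List String → PySem.Dict String (List String) → PySem.Dict String (List String)
  | [], d => d
  | h :: ls, d =>
    let r := pvTakeBody ls
    let parts := pvSplit h "<TRIPOS>"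
    let d' :=
      if hl : 1 < parts.length then d.insert parts[1] r.1 else d
    pvSections r.2 d'
  termination_by ls => ls.length
  decreasing_by exact Nat.lt_succ_of_le (pvTakeBody_snd_le ls)

def parse_py_alt (block : String) : List (String × List String) :=
  let lines := pvSplit (PySem.Str.strip block) "\n"
  (pvSections (pvDropPre lines) PySem.Dict.empty).items

-- ===== PRECONDITION & SPEC =====
-- On blocks containing a section header whose record type is literally '<TEMP>' (a line
-- starting with '@' with '<TEMP>' after '<TRIPOS>'), A silently discards that record —
-- its final pop of the internal '<TEMP>' sentinel bucket also removes it — while B keeps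
-- the record under key '<TEMP>' as intended: '<TEMP>' is a legitimate record-type name.
def D_parse_py (block : String) : Prop :=
  ∃ l ∈ pvSplit (PySem.Str.strip block) "\n",
    PySem.Str.startswith l "@" = true ∧
    PySem.List.pyGet? (pvSplit l "<TRIPOS>") 1 = some "<TEMP>"
instance (block : String) : Decidable (D_parse_py block) := by unfold D_parse_py; infer_instance

def Spec_parse_py (block : String) (out : List (String × List String)) : Prop :=
  ¬ D_parse_py block → out = parse_py_alt block
instance (block : String) (out : List (String × List String)) : Decidable (Spec_parse_py block out) := by unfold Spec_parse_py; infer_instance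

def pvDiffWitness_parse_py : String := "@<TRIPOS><TEMP>\nx"
def pvDiffWitnessOut_parse_py : (List (String × List String)) × (List (String × List String)) :=
  ([], [("<TEMP>", ["x"])])

-- ===== CLAIM (what is proved, stated in full; the proofs are below) =====
def Claim_unchanged_parse_py : Prop := ∀ (block : String), Dom_parse_py block → Spec_parse_py block (parse_py block)
def Claim_changed_parse_py : Prop := Dom_parse_py (pvDiffWitness_parse_py) ∧ D_parse_py (pvDiffWitness_parse_py) ∧ parse_py (pvDiffWitness_parse_py) = pvDiffWitnessOut_parse_py.1 ∧ parse_py_alt (pvDiffWitness_parse_py) = pvDiffWitnessOut_parse_py.2 ∧ pvDiffWitnessOut_parse_py.1 ≠ pvDiffWitnessOut_parse_py.2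
def Claim_exact_parse_py : Prop := ∀ (block : String), Dom_parse_py block → D_parse_py block → parse_py block ≠ parse_py_alt block

-- ===== LEMMAS AND PROOFS =====

-- `lines` is empty or starts at a section marker
def pvBoundary : List String → Prop
  | [] => True
  | l :: _ => PySem.Str.startswith l "@" = true

theorem pvDropPre_boundary (ls : List String) (h : pvBoundary ls) : pvDropPre ls = ls := by
  cases ls with
  | nil => rfl
  | cons l ls =>
    simp only [pvDropPre]
    rw [if_pos (show PySem.Str.startswith l "@" = true from h)]

theorem pvStepA_header_some (st : PySem.Dict String (List String) × String) (l K : String)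
    (hl : PySem.Str.startswith l "@" = true)
    (hget : PySem.List.pyGet? (pvSplit l "<TRIPOS>") 1 = some K) :
    pvStepA st l = (st.1.insert K [], K) := by
  have hl' : PySem.Chars.startswith l.toList ['@'] = true := by simpa using hl
  simp [pvStepA, hl', hget]

theorem pvStepA_header_none (st : PySem.Dict String (List String) × String) (l : String)
    (hl : PySem.Str.startswith l "@" = true)
    (hget : PySem.List.pyGet? (pvSplit l "<TRIPOS>") 1 = none) :
    pvStepA st l = (st.1, "<TEMP>") := by
  have hl' : PySem.Chars.startswith l.toList ['@'] = true := by simpa using hl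
  simp [pvStepA, hl', hget]

theorem pvStepA_body (st : PySem.Dict String (List String) × String) (l : String)
    (hl : PySem.Str.startswith l "@" = false) :
    pvStepA st l = (st.1.modify st.2 [] (fun xs => xs ++ [PySem.Str.strip l]), st.2) := by
  have hl' : PySem.Chars.startswith l.toList ['@'] = false := by simpa using hl
  simp [pvStepA, hl']

-- filtering a key away swallows the in-place replacement `insert` performs at that key
theorem pvFilter_map_self (k : String) (v : List String) (ps : List (String × List String)) :
    List.filter (fun p => !(p.1 == k)) (ps.map (fun p => if (p.1 == k) = true then (k, v) else p))
      = List.filter (fun p => !(p.1 == k)) ps := by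
  rw [List.filter_map]
  rw [List.filter_congr (q := fun p : String × List String => !(p.1 == k))
    (fun x _ => by by_cases hx : x.1 = k <;> simp [hx])]
  rw [List.map_congr_left (g := id)
    (fun x hx => by
      have := List.of_mem_filter hx
      simp only [Bool.not_eq_eq_eq_not, Bool.not_true, beq_eq_false_iff_ne, ne_eq] at this
      simp [this]),
    List.map_id]

-- erasing a key swallows any insert at that key
theorem pvErase_insert_self (d : PySem.Dict String (List String)) (k : String) (v : List String) :
    (d.insert k v).erase k = d.erase k := by
  unfold PySem.Dict.insert PySem.Dict.erase
  split
  · exact congrArg PySem.Dict.mk (pvFilter_map_self k v d.items)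
  · simp [List.filter_append]

theorem pvErase_modify_self (d : PySem.Dict String (List String)) (k : String)
    (dflt : List String) (f : List String → List String) :
    (d.modify k dflt f).erase k = d.erase k := by
  unfold PySem.Dict.modify
  exact pvErase_insert_self ..

theorem pvFilter_map_ne (k t : String) (v : List String)
    (ps : List (String × List String)) :
    List.filter (fun p => !(p.1 == t)) (ps.map (fun p => if (p.1 == k) = true then (k, v) else p))
      = List.map (fun p => if (p.1 == k) = true then (k, v) else p)
          (List.filter (fun p => !(p.1 == t)) ps) := by
  rw [List.filter_map]
  exact congrArg _ (List.filter_congr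
    (fun x _ => by by_cases hx : x.1 = k <;> simp [hx]))

theorem pvAny_filter_ne (k t : String) (h : k ≠ t) (ps : List (String × List String)) :
    (List.filter (fun p => !(p.1 == t)) ps).any (fun p => p.1 == k)
      = ps.any (fun p => p.1 == k) := by
  rw [List.any_filter]
  exact List.any_congr rfl
    (fun x => by by_cases hx : x.1 = k <;> simp [hx, h])

-- erase and insert at distinct keys commute
theorem pvErase_insert_of_ne (d : PySem.Dict String (List String)) (k t : String)
    (v : List String) (h : k ≠ t) :
    (d.insert k v).erase t = (d.erase t).insert k v := by
  have hcont : (d.erase t).contains k = d.contains k := by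
    unfold PySem.Dict.erase PySem.Dict.contains
    exact pvAny_filter_ne k t h d.items
  unfold PySem.Dict.insert
  rw [hcont]
  split
  · unfold PySem.Dict.erase
    exact congrArg PySem.Dict.mk (pvFilter_map_ne k t v d.items)
  · unfold PySem.Dict.erase
    have hkt : (k == t) = false := by simp [h]
    simp [List.filter_append, hkt]

-- a modify right after an insert at the same key rewrites the inserted value
theorem pvModify_insert_self (d : PySem.Dict String (List String)) (k : String)
    (v : List String) (dflt : List String) (f : List String → List String) :
    (d.insert k v).modify k dflt f = d.insert k (f v) := by
  unfold PySem.Dict.modify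
  rw [PySem.Dict.getD_insert_self, PySem.Dict.insert_insert_self]

-- A's loop over a run of non-'@' lines only appends to the current bucket
theorem pvBodyFold (body : List String) (st : PySem.Dict String (List String) × String)
    (h : ∀ l ∈ body, PySem.Str.startswith l "@" = false) :
    body.foldl pvStepA st =
      (body.foldl (fun dd l => dd.modify st.2 [] (fun xs => xs ++ [PySem.Str.strip l])) st.1,
       st.2) := by
  induction body generalizing st with
  | nil => rfl
  | cons l ls ih =>
    rw [List.foldl_cons, List.foldl_cons, pvStepA_body st l (h l (by simp))]
    exact ih _ (fun x hx => h x (by simp [hx]))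

-- appending line by line after an insert builds the full body at once
theorem pvFoldModify_insert (body : List String) (d : PySem.Dict String (List String))
    (k : String) (v : List String) :
    body.foldl (fun dd l => dd.modify k [] (fun xs => xs ++ [PySem.Str.strip l])) (d.insert k v)
      = d.insert k (v ++ body.map PySem.Str.strip) := by
  induction body generalizing v with
  | nil => simp
  | cons l ls ih =>
    simp only [List.foldl_cons, pvModify_insert_self, ih, List.map_cons]
    congr 1
    simp

-- appends into the bucket to be erased leave the erased dict unchanged
theorem pvFoldModify_erase (body : List String) (d : PySem.Dict String (List String))
    (k : String) :
    (body.foldl (fun dd l => dd.modify k [] (fun xs => xs ++ [PySem.Str.strip l])) d).erase k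
      = d.erase k := by
  induction body generalizing d with
  | nil => rfl
  | cons l ls ih => simp only [List.foldl_cons, ih, pvErase_modify_self]

theorem pvTakeBody_eq (ls : List String) :
    pvTakeBody ls =
      ((ls.takeWhile (fun l => !PySem.Str.startswith l "@")).map PySem.Str.strip,
       ls.dropWhile (fun l => !PySem.Str.startswith l "@")) := by
  induction ls with
  | nil => rfl
  | cons l ls ih =>
    simp only [pvTakeBody, List.takeWhile_cons, List.dropWhile_cons, ih]
    by_cases hl : PySem.Str.startswith l "@" = true
    · rw [if_pos hl, hl]; simp
    · rw [if_neg hl]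
      have hl' : PySem.Str.startswith l "@" = false := by
        cases hb : PySem.Str.startswith l "@" with
        | false => rfl
        | true => exact absurd hb hl
      rw [hl']
      simp

theorem pvBoundary_dropWhile (ls : List String) :
    pvBoundary (ls.dropWhile (fun l => !PySem.Str.startswith l "@")) := by
  induction ls with
  | nil => trivial
  | cons l ls ih =>
    rw [List.dropWhile_cons]
    cases hb : PySem.Str.startswith l "@" with
    | true =>
      rw [if_neg (by simp)]
      exact hb
    | false =>
      rw [if_pos (by simp)]
      exact ih

theorem pvGet?_one {α : Type} (xs : List α) : PySem.List.pyGet? xs 1 = xs[1]? := by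
  simp only [PySem.List.pyGet?, PySem.List.pyIdx?]
  rw [if_pos (by omega)]
  split_ifs with h
  · simp
  · exact (List.getElem?_eq_none (by omega)).symm

-- the heart of the equivalence: outside D_, A's fold from any boundary state equals B's
-- section recursion (no header of `lines` names the record type "<TEMP>")
theorem pvMain : ∀ (n : ℕ) (lines : List String), lines.length ≤ n →
    (∀ l ∈ lines, PySem.Str.startswith l "@" = true →
      PySem.List.pyGet? (pvSplit l "<TRIPOS>") 1 ≠ some "<TEMP>") →
    ∀ (d : PySem.Dict String (List String)) (k : String),
    (k = "<TEMP>" ∨ pvBoundary lines) →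
    ((lines.foldl pvStepA (d, k)).1).erase "<TEMP>"
      = pvSections (pvDropPre lines) (d.erase "<TEMP>") := by
  intro n
  induction n with
  | zero =>
    intro lines hlen _ d k _
    have hnil : lines = [] := List.eq_nil_of_length_eq_zero (Nat.le_zero.mp hlen)
    subst hnil
    simp [pvSections, pvDropPre]
  | succ n ih =>
    intro lines hlen hD d k hk
    cases lines with
    | nil => simp [pvSections, pvDropPre]
    | cons l ls =>
      by_cases hl : PySem.Str.startswith l "@" = true
      · -- header line: one full section
        have hdrop : pvDropPre (l :: ls) = l :: ls := by
          simp only [pvDropPre]; rw [if_pos hl]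
        rw [hdrop]
        set p : String → Bool := fun l => !PySem.Str.startswith l "@" with hp
        have hsplit : ls = ls.takeWhile p ++ ls.dropWhile p := List.takeWhile_append_dropWhile.symm
        have hbodymem : ∀ x ∈ ls.takeWhile p, PySem.Str.startswith x "@" = false := by
          intro x hx
          have hx' := List.mem_takeWhile_imp hx
          rw [hp] at hx'
          simpa using hx'
        have htail_len : (ls.dropWhile p).length ≤ n := by
          have h1 := List.length_dropWhile_le p ls
          simp only [List.length_cons] at hlen
          omega
        have htail_D : ∀ x ∈ ls.dropWhile p, PySem.Str.startswith x "@" = true →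
            PySem.List.pyGet? (pvSplit x "<TRIPOS>") 1 ≠ some "<TEMP>" := by
          intro x hx
          exact hD x (List.mem_cons_of_mem l ((List.dropWhile_sublist _).mem hx))
        have hbnd : pvBoundary (ls.dropWhile p) := by rw [hp]; exact pvBoundary_dropWhile ls
        have hdroptail : pvDropPre (ls.dropWhile p) = ls.dropWhile p := pvDropPre_boundary _ hbnd
        simp only [pvSections, pvTakeBody_eq, ← hp]
        rcases hget : PySem.List.pyGet? (pvSplit l "<TRIPOS>") 1 with _ | K
        · -- '@' line without <TRIPOS>: section discarded, back to the <TEMP> bucket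
          have hlen1 : ¬ 1 < (pvSplit l "<TRIPOS>").length := by
            rw [pvGet?_one] at hget
            have := List.getElem?_eq_none_iff.mp hget
            omega
          rw [List.foldl_cons, pvStepA_header_none (d, k) l hl hget]
          conv_lhs => rw [hsplit]
          rw [List.foldl_append, pvBodyFold (ls.takeWhile p) (d, "<TEMP>") hbodymem,
            ih (ls.dropWhile p) htail_len htail_D _ _ (Or.inr hbnd), hdroptail, pvFoldModify_erase,
            dif_neg hlen1]
        · -- section with record type K
          have hK : K ≠ "<TEMP>" := by
            intro hKe
            exact hD l (List.mem_cons_self ..) hl (hKe ▸ hget)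
          rw [List.foldl_cons, pvStepA_header_some (d, k) l K hl hget]
          rw [pvGet?_one] at hget
          obtain ⟨hlen1, hKval⟩ := List.getElem?_eq_some_iff.mp hget
          conv_lhs => rw [hsplit]
          rw [List.foldl_append, pvBodyFold (ls.takeWhile p) (d.insert K [], K) hbodymem]
          simp only [pvFoldModify_insert, List.nil_append]
          rw [ih (ls.dropWhile p) htail_len htail_D _ _ (Or.inr hbnd), hdroptail, dif_pos hlen1,
            hKval, pvErase_insert_of_ne _ _ _ _ hK]
      · -- a line before any marker: it goes to the <TEMP> bucket, later erased
        have hl' : PySem.Str.startswith l "@" = false := by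
          cases hb : PySem.Str.startswith l "@" with
          | false => rfl
          | true => exact absurd hb hl
        have hk' : k = "<TEMP>" := by
          rcases hk with hk | hk
          · exact hk
          · exact absurd hk hl
        subst hk'
        have hdrop : pvDropPre (l :: ls) = pvDropPre ls := by
          simp only [pvDropPre]; rw [if_neg hl]
        rw [hdrop, List.foldl_cons, pvStepA_body (d, "<TEMP>") l hl',
          ih ls (by simp only [List.length_cons] at hlen; omega)
            (fun x hx => hD x (List.mem_cons_of_mem l hx)) _ _ (Or.inl rfl),
          pvErase_modify_self]

-- ===== lemmas for the tightness claim =====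

-- insert preserves key membership, and establishes its own key
theorem pvAny_map_insert (k t : String) (v : List String) (ps : List (String × List String)) :
    (ps.map (fun p => if (p.1 == k) = true then (k, v) else p)).any (fun p => p.1 == t)
      = ps.any (fun p => p.1 == t) := by
  rw [List.any_map]
  exact List.any_congr rfl (fun x => by by_cases hx : x.1 = k <;> simp [hx])

theorem pvContains_insert_mono (d : PySem.Dict String (List String)) (k t : String)
    (v : List String) (h : d.contains t = true) : (d.insert k v).contains t = true := by
  unfold PySem.Dict.insert PySem.Dict.contains at *
  split
  · rw [pvAny_map_insert]
    exact h
  · rw [List.any_append]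
    simp [h]

theorem pvContains_insert_self (d : PySem.Dict String (List String)) (k : String)
    (v : List String) : (d.insert k v).contains k = true := by
  unfold PySem.Dict.insert PySem.Dict.contains
  split
  · rw [pvAny_map_insert]
    assumption
  · rw [List.any_append]
    simp

theorem pvErase_not_contains (d : PySem.Dict String (List String)) (t : String) :
    (d.erase t).contains t = false := by
  unfold PySem.Dict.erase PySem.Dict.contains
  rw [List.any_filter]
  simp

-- a member of the list on which the drop predicate fails survives dropWhile / pvDropPre
theorem pvMem_dropWhile {A : Type} (p : A → Bool) (ls : List A) (l : A)
    (hl : p l = false) (h : l ∈ ls) : l ∈ ls.dropWhile p := by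
  induction ls with
  | nil => exact absurd h (List.not_mem_nil)
  | cons x xs ih =>
    rw [List.dropWhile_cons]
    split
    · rcases List.mem_cons.mp h with rfl | hm
      · simp_all
      · exact ih hm
    · exact h

theorem pvMem_dropPre (ls : List String) (l : String) (hl : PySem.Str.startswith l "@" = true)
    (h : l ∈ ls) : l ∈ pvDropPre ls := by
  induction ls with
  | nil => exact absurd h (List.not_mem_nil)
  | cons x xs ih =>
    simp only [pvDropPre]
    split
    · exact h
    · rcases List.mem_cons.mp h with rfl | hm
      · exact absurd (by simpa using hl) ‹¬ _›
      · exact ih hm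

theorem pvSections_contains_mono : ∀ (n : ℕ) (ls : List String), ls.length ≤ n →
    ∀ (d : PySem.Dict String (List String)) (t : String), d.contains t = true →
    (pvSections ls d).contains t = true := by
  intro n
  induction n with
  | zero =>
    intro ls hlen d t h
    have : ls = [] := List.eq_nil_of_length_eq_zero (Nat.le_zero.mp hlen)
    subst this
    simpa [pvSections] using h
  | succ n ih =>
    intro ls hlen d t h
    cases ls with
    | nil => simpa [pvSections] using h
    | cons x xs =>
      simp only [pvSections]
      have hlen' : (pvTakeBody xs).2.length ≤ n := by
        have := pvTakeBody_snd_le xs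
        simp only [List.length_cons] at hlen
        omega
      split
      · exact ih _ hlen' _ _ (pvContains_insert_mono _ _ _ _ h)
      · exact ih _ hlen' _ _ h

theorem pvSections_contains_temp : ∀ (n : ℕ) (ls : List String), ls.length ≤ n →
    (∃ l ∈ ls, PySem.Str.startswith l "@" = true ∧
      PySem.List.pyGet? (pvSplit l "<TRIPOS>") 1 = some "<TEMP>") →
    ∀ (d : PySem.Dict String (List String)),
    (pvSections ls d).contains "<TEMP>" = true := by
  intro n
  induction n with
  | zero =>
    intro ls hlen h d
    have : ls = [] := List.eq_nil_of_length_eq_zero (Nat.le_zero.mp hlen)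
    subst this
    obtain ⟨l, hl, _⟩ := h
    exact absurd hl (List.not_mem_nil)
  | succ n ih =>
    intro ls hlen h d
    obtain ⟨l, hmem, hat, hget⟩ := h
    cases ls with
    | nil => exact absurd hmem (List.not_mem_nil)
    | cons x xs =>
      simp only [pvSections]
      have hlen' : (pvTakeBody xs).2.length ≤ n := by
        have := pvTakeBody_snd_le xs
        simp only [List.length_cons] at hlen
        omega
      rcases List.mem_cons.mp hmem with rfl | hm
      · -- the witness is the head: its key "<TEMP>" is inserted now and survives
        rw [pvGet?_one] at hget
        obtain ⟨h1, hval⟩ := List.getElem?_eq_some_iff.mp hget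
        rw [dif_pos h1, hval]
        exact pvSections_contains_mono n _ hlen' _ _ (pvContains_insert_self _ _ _)
      · -- the witness is further on: it survives into the tail of the section
        have hm' : l ∈ (pvTakeBody xs).2 := by
          rw [pvTakeBody_eq]
          exact pvMem_dropWhile _ _ _ (by simpa using hat) hm
        split <;> exact ih _ hlen' ⟨l, hm', hat, hget⟩ _

-- ===== VERDICT (by name: the statement is the Claim_ definition above) =====
theorem parse_py_spec : Claim_unchanged_parse_py := by
  intro block _ hnD
  show (((pvSplit (PySem.Str.strip block) "\n").foldl pvStepA
      (PySem.Dict.empty.insert "<TEMP>" [], "<TEMP>")).1.erase "<TEMP>").items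
    = (pvSections (pvDropPre (pvSplit (PySem.Str.strip block) "\n")) PySem.Dict.empty).items
  have hD : ∀ l ∈ pvSplit (PySem.Str.strip block) "\n",
      PySem.Str.startswith l "@" = true →
      PySem.List.pyGet? (pvSplit l "<TRIPOS>") 1 ≠ some "<TEMP>" := by
    intro l hl hat hget
    exact hnD ⟨l, hl, hat, hget⟩
  rw [pvMain (pvSplit (PySem.Str.strip block) "\n").length _ le_rfl hD _ _ (Or.inl rfl),
    pvErase_insert_self]
  rfl

theorem parse_py_changed : Claim_changed_parse_py := by
  unfold Claim_changed_parse_py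
  refine ⟨by decide, by decide, by decide, ?_, by decide⟩
  show parse_py_alt pvDiffWitness_parse_py = [("<TEMP>", ["x"])]
  simp only [parse_py_alt, pvDiffWitness_parse_py]
  rw [show pvSplit (PySem.Str.strip "@<TRIPOS><TEMP>\nx") "\n" = ["@<TRIPOS><TEMP>", "x"] from by decide]
  rw [show pvDropPre ["@<TRIPOS><TEMP>", "x"] = ["@<TRIPOS><TEMP>", "x"] from by decide]
  rw [pvSections.eq_def]
  simp only []
  rw [show pvTakeBody ["x"] = (["x"], []) from by decide]
  rw [show pvSplit "@<TRIPOS><TEMP>" "<TRIPOS>" = ["@", "<TEMP>"] from by decide]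
  rw [dif_pos (by decide)]
  rw [pvSections.eq_def]
  decide

theorem parse_py_tight : Claim_exact_parse_py := by
  intro block _ hd heq
  obtain ⟨l, hmem, hat, hget⟩ := hd
  have hB : (pvSections (pvDropPre (pvSplit (PySem.Str.strip block) "\n"))
      PySem.Dict.empty).contains "<TEMP>" = true :=
    pvSections_contains_temp _ _ le_rfl ⟨l, pvMem_dropPre _ _ hat hmem, hat, hget⟩ _
  have hA : (((pvSplit (PySem.Str.strip block) "\n").foldl pvStepA
      (PySem.Dict.empty.insert "<TEMP>" [], "<TEMP>")).1.erase "<TEMP>").contains "<TEMP>" = false :=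
    pvErase_not_contains _ _
  unfold parse_py parse_py_alt at heq
  simp only at heq
  unfold PySem.Dict.contains at hA hB
  rw [heq] at hA
  rw [hB] at hA
  exact absurd hA (by decide)
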